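-- pv_equiv track=rewrite | github.com/sayanPsybernova/telemetry_indra_sayan_modified | src/parser.py | get_session_type
-- ===== SOURCE A (Python) =====
-- def get_session_type(app: str, context: str = None, field: str = None) -> str:
--     """
--     Determine the type of activity based on app and context.
--
--     Returns: Communication, Email, File Management, Web Browsing, Document, ERP,
--              Text Editing, Document Viewing, System Dialog, Cloud Storage,
--              Clipboard, Data Sync, AI Tools, Other
--     """
--     if not app:
--         return "Other"
--
--     app_lower = app.lower()
--
--     # Communication (chat, video calls)
--     if any(x in app_lower for x in ['teams', 'slack', 'zoom', 'meet', 'skype']):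
--         return "Communication"
--
--     # Email
--     if 'outlook' in app_lower:
--         return "Email"
--
--     # Document/Spreadsheet (Microsoft Office)
--     if any(x in app_lower for x in ['excel', 'word', 'powerpoint']):
--         return "Document"
--
--     # Web Browsing
--     if any(x in app_lower for x in ['chrome', 'edge', 'firefox', 'browser', 'safari', 'opera']):
--         return "Web Browsing"
--
--     # File Management (File Explorer, file operations)
--     if any(x in app_lower for x in ['file explorer', 'explorer', 'finder', '7-zip', '7zip']):
--         return "File Management"
--
--     # Text Editing
--     if any(x in app_lower for x in ['notepad', 'sublime', 'vscode', 'vim', 'emacs']):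
--         return "Text Editing"
--
--     # PDF/Document Viewing
--     if any(x in app_lower for x in ['acrobat', 'pdf', 'reader', 'foxit']):
--         return "Document Viewing"
--
--     # System Dialogs (Print, Save As, etc.)
--     if any(x in app_lower for x in ['print dialog', 'save as', 'open dialog', 'nuidialog', 'system dialog']):
--         return "System Dialog"
--
--     # ERP
--     if any(x in app_lower for x in ['sap', 'd365', 'dynamics', 'oracle', 'netsuite', 'erp']):
--         return "ERP"
--
--     # Cloud Storage
--     if any(x in app_lower for x in ['onedrive', 'dropbox', 'google drive', 'box']):
--         return "Cloud Storage"
--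
--     # AI Tools
--     if any(x in app_lower for x in ['chatgpt', 'openai', 'copilot', 'claude']):
--         return "AI Tools"
--
--     # Clipboard
--     if 'clipboard' in app_lower:
--         return "Clipboard"
--
--     # Data Sync/Reconciliation
--     if any(x in app_lower for x in ['reconciliation', 'data reconciliation', 'xlmain']):
--         return "Data Sync"
--
--     return "Other"
-- ===== SOURCE B (Python) =====
-- CATEGORIES = [
--     ('Communication', ['teams', 'slack', 'zoom', 'meet', 'skype']),
--     ('Email', ['outlook']),
--     ('Document', ['excel', 'word', 'powerpoint']),
--     ('Web Browsing', ['chrome', 'edge', 'firefox', 'browser', 'safari', 'opera']),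
--     ('File Management', ['file explorer', 'explorer', 'finder', '7-zip', '7zip']),
--     ('Text Editing', ['notepad', 'sublime', 'vscode', 'vim', 'emacs']),
--     ('Document Viewing', ['acrobat', 'pdf', 'reader', 'foxit']),
--     ('System Dialog', ['print dialog', 'save as', 'open dialog', 'nuidialog', 'system dialog']),
--     ('ERP', ['sap', 'd365', 'dynamics', 'oracle', 'netsuite', 'erp']),
--     ('Cloud Storage', ['onedrive', 'dropbox', 'google drive', 'box']),
--     ('AI Tools', ['chatgpt', 'openai', 'copilot', 'claude']),
--     ('Clipboard', ['clipboard']),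
--     ('Data Sync', ['reconciliation', 'data reconciliation', 'xlmain']),
-- ]
--
-- # pattern -> (priority rank, label); built once, flat
-- PATTERN_TABLE = {}
-- for _rank, (_label, _pats) in enumerate(CATEGORIES):
--     for _p in _pats:
--         PATTERN_TABLE[_p] = (_rank, _label)
--
--
-- def get_session_type(app: str, context: str = None, field: str = None) -> str:
--     """Min-priority selection over a flat pattern table (no early return,
--     no per-category branching): scan every pattern once, keep the matching
--     pattern with the smallest category rank, return its label."""
--     if not app:
--         return "Other"
--     app_lower = app.lower()
--     best = None
--     for pat, (rank, label) in PATTERN_TABLE.items():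
--         if pat in app_lower and (best is None or rank < best[0]):
--             best = (rank, label)
--     return best[1] if best is not None else "Other"
-- ===== Notes on version B (the rewrite author's own statement) =====
-- stated objective: alternative
-- what changed: Replaced A's ordered 13-branch early-return if-chain with a single no-early-exit fold over a flat pattern->(rank,label) table that keeps the matching pattern of minimum category rank and returns its label.
import Mathlib
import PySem

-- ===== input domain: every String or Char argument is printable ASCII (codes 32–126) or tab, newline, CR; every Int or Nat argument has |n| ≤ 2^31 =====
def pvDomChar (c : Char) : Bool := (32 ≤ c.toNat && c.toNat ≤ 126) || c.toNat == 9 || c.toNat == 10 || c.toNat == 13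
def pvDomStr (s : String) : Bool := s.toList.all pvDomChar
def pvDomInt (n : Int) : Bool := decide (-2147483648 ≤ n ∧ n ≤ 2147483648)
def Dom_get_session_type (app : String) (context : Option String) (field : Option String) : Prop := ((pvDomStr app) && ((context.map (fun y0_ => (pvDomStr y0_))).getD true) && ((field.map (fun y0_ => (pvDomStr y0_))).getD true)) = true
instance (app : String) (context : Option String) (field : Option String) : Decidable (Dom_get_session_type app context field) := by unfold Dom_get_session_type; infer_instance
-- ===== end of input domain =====

-- B replaces A's ordered early-return if-chain with a single min-rank fold over a flat pattern table (no early return); same cost, alternative structure.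

-- ===== PORT A =====
-- literal transliteration of A's if-chain; 'any(x in app_lower for x in [...])' = List.any with PySem.Str.isIn
def get_session_type (app : String) (context : Option String) (field : Option String) : String :=
  if app == "" then "Other"
  else
    let al := PySem.Str.lower app
    if ["teams", "slack", "zoom", "meet", "skype"].any (fun x => PySem.Str.isIn x al) then "Communication"
        else if PySem.Str.isIn "outlook" al then "Email"
        else if ["excel", "word", "powerpoint"].any (fun x => PySem.Str.isIn x al) then "Document"
        else if ["chrome", "edge", "firefox", "browser", "safari", "opera"].any (fun x => PySem.Str.isIn x al) then "Web Browsing"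
        else if ["file explorer", "explorer", "finder", "7-zip", "7zip"].any (fun x => PySem.Str.isIn x al) then "File Management"
        else if ["notepad", "sublime", "vscode", "vim", "emacs"].any (fun x => PySem.Str.isIn x al) then "Text Editing"
        else if ["acrobat", "pdf", "reader", "foxit"].any (fun x => PySem.Str.isIn x al) then "Document Viewing"
        else if ["print dialog", "save as", "open dialog", "nuidialog", "system dialog"].any (fun x => PySem.Str.isIn x al) then "System Dialog"
        else if ["sap", "d365", "dynamics", "oracle", "netsuite", "erp"].any (fun x => PySem.Str.isIn x al) then "ERP"
        else if ["onedrive", "dropbox", "google drive", "box"].any (fun x => PySem.Str.isIn x al) then "Cloud Storage"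
        else if ["chatgpt", "openai", "copilot", "claude"].any (fun x => PySem.Str.isIn x al) then "AI Tools"
        else if PySem.Str.isIn "clipboard" al then "Clipboard"
        else if ["reconciliation", "data reconciliation", "xlmain"].any (fun x => PySem.Str.isIn x al) then "Data Sync"
    else "Other"

-- ===== PORT B =====
-- flat pattern table: (pattern, category rank, label), as Source B's PATTERN_TABLE (insertion order)
def pvPatternTable : List (String × Nat × String) :=
  [("teams", 0, "Communication"),
   ("slack", 0, "Communication"),
   ("zoom", 0, "Communication"),
   ("meet", 0, "Communication"),
   ("skype", 0, "Communication"),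
   ("outlook", 1, "Email"),
   ("excel", 2, "Document"),
   ("word", 2, "Document"),
   ("powerpoint", 2, "Document"),
   ("chrome", 3, "Web Browsing"),
   ("edge", 3, "Web Browsing"),
   ("firefox", 3, "Web Browsing"),
   ("browser", 3, "Web Browsing"),
   ("safari", 3, "Web Browsing"),
   ("opera", 3, "Web Browsing"),
   ("file explorer", 4, "File Management"),
   ("explorer", 4, "File Management"),
   ("finder", 4, "File Management"),
   ("7-zip", 4, "File Management"),
   ("7zip", 4, "File Management"),
   ("notepad", 5, "Text Editing"),
   ("sublime", 5, "Text Editing"),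
   ("vscode", 5, "Text Editing"),
   ("vim", 5, "Text Editing"),
   ("emacs", 5, "Text Editing"),
   ("acrobat", 6, "Document Viewing"),
   ("pdf", 6, "Document Viewing"),
   ("reader", 6, "Document Viewing"),
   ("foxit", 6, "Document Viewing"),
   ("print dialog", 7, "System Dialog"),
   ("save as", 7, "System Dialog"),
   ("open dialog", 7, "System Dialog"),
   ("nuidialog", 7, "System Dialog"),
   ("system dialog", 7, "System Dialog"),
   ("sap", 8, "ERP"),
   ("d365", 8, "ERP"),
   ("dynamics", 8, "ERP"),
   ("oracle", 8, "ERP"),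
   ("netsuite", 8, "ERP"),
   ("erp", 8, "ERP"),
   ("onedrive", 9, "Cloud Storage"),
   ("dropbox", 9, "Cloud Storage"),
   ("google drive", 9, "Cloud Storage"),
   ("box", 9, "Cloud Storage"),
   ("chatgpt", 10, "AI Tools"),
   ("openai", 10, "AI Tools"),
   ("copilot", 10, "AI Tools"),
   ("claude", 10, "AI Tools"),
   ("clipboard", 11, "Clipboard"),
   ("reconciliation", 12, "Data Sync"),
   ("data reconciliation", 12, "Data Sync"),
   ("xlmain", 12, "Data Sync")]

-- min-rank fold: keep the matching pattern of smallest rank; no early return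
def get_session_type_alt (app : String) (context : Option String) (field : Option String) : String :=
  if app == "" then "Other"
  else
    let al := PySem.Str.lower app
    let best := pvPatternTable.foldl
      (fun acc e =>
        if PySem.Str.isIn e.1 al && (match acc with | none => true | some b => decide (e.2.1 < b.1))
        then some (e.2.1, e.2.2) else acc)
      (none : Option (Nat × String))
    match best with
    | some b => b.2
    | none => "Other"

-- ===== PRECONDITION & SPEC =====
def Spec_get_session_type (app : String) (context : Option String) (field : Option String) (out : String) : Prop := out = get_session_type_alt app context field
instance (app : String) (context : Option String) (field : Option String) (out : String) : Decidable (Spec_get_session_type app context field out) := by unfold Spec_get_session_type; infer_instance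

-- ===== CLAIM =====
def Claim_equal_get_session_type : Prop := ∀ (app : String) (context : Option String) (field : Option String), Dom_get_session_type app context field → Spec_get_session_type app context field (get_session_type app context field)

-- ===== LEMMAS AND PROOFS =====

-- ===== VERDICT =====
set_option maxHeartbeats 4000000 in
theorem get_session_type_spec : Claim_equal_get_session_type := by
  intro app context field _
  unfold Spec_get_session_type get_session_type get_session_type_alt pvPatternTable
  by_cases h : app == ""
  · simp [h]
  · simp only [h, Bool.false_eq_true, if_false]
    generalize PySem.Str.lower app = al
    cases h0 : PySem.Str.isIn "teams" al with
    | true => simp_all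
    | false =>
      cases h1 : PySem.Str.isIn "slack" al with
      | true => simp_all
      | false =>
        cases h2 : PySem.Str.isIn "zoom" al with
        | true => simp_all
        | false =>
          cases h3 : PySem.Str.isIn "meet" al with
          | true => simp_all
          | false =>
            cases h4 : PySem.Str.isIn "skype" al with
            | true => simp_all
            | false =>
              cases h5 : PySem.Str.isIn "outlook" al with
              | true => simp_all
              | false =>
                cases h6 : PySem.Str.isIn "excel" al with
                | true => simp_all
                | false =>
                  cases h7 : PySem.Str.isIn "word" al with
                  | true => simp_all
                  | false =>
                    cases h8 : PySem.Str.isIn "powerpoint" al with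
                    | true => simp_all
                    | false =>
                      cases h9 : PySem.Str.isIn "chrome" al with
                      | true => simp_all
                      | false =>
                        cases h10 : PySem.Str.isIn "edge" al with
                        | true => simp_all
                        | false =>
                          cases h11 : PySem.Str.isIn "firefox" al with
                          | true => simp_all
                          | false =>
                            cases h12 : PySem.Str.isIn "browser" al with
                            | true => simp_all
                            | false =>
                              cases h13 : PySem.Str.isIn "safari" al with
                              | true => simp_all
                              | false =>
                                cases h14 : PySem.Str.isIn "opera" al with
                                | true => simp_all
                                | false =>
                                  cases h15 : PySem.Str.isIn "file explorer" al with
                                  | true => simp_all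
                                  | false =>
                                    cases h16 : PySem.Str.isIn "explorer" al with
                                    | true => simp_all
                                    | false =>
                                      cases h17 : PySem.Str.isIn "finder" al with
                                      | true => simp_all
                                      | false =>
                                        cases h18 : PySem.Str.isIn "7-zip" al with
                                        | true => simp_all
                                        | false =>
                                          cases h19 : PySem.Str.isIn "7zip" al with
                                          | true => simp_all
                                          | false =>
                                            cases h20 : PySem.Str.isIn "notepad" al with
                                            | true => simp_all
                                            | false =>
                                              cases h21 : PySem.Str.isIn "sublime" al with
                                              | true => simp_all
                                              | false =>
                                                cases h22 : PySem.Str.isIn "vscode" al with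
                                                | true => simp_all
                                                | false =>
                                                  cases h23 : PySem.Str.isIn "vim" al with
                                                  | true => simp_all
                                                  | false =>
                                                    cases h24 : PySem.Str.isIn "emacs" al with
                                                    | true => simp_all
                                                    | false =>
                                                      cases h25 : PySem.Str.isIn "acrobat" al with
                                                      | true => simp_all
                                                      | false =>
                                                        cases h26 : PySem.Str.isIn "pdf" al with
                                                        | true => simp_all
                                                        | false =>
                                                          cases h27 : PySem.Str.isIn "reader" al with
                                                          | true => simp_all
                                                          | false =>
                                                            cases h28 : PySem.Str.isIn "foxit" al with
                                                            | true => simp_all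
                                                            | false =>
                                                              cases h29 : PySem.Str.isIn "print dialog" al with
                                                              | true => simp_all
                                                              | false =>
                                                                cases h30 : PySem.Str.isIn "save as" al with
                                                                | true => simp_all
                                                                | false =>
                                                                  cases h31 : PySem.Str.isIn "open dialog" al with
                                                                  | true => simp_all
                                                                  | false =>
                                                                    cases h32 : PySem.Str.isIn "nuidialog" al with
                                                                    | true => simp_all
                                                                    | false =>
                                                                      cases h33 : PySem.Str.isIn "system dialog" al with
                                                                      | true => simp_all
                                                                      | false =>
                                                                        cases h34 : PySem.Str.isIn "sap" al with
                                                                        | true => simp_all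
                                                                        | false =>
                                                                          cases h35 : PySem.Str.isIn "d365" al with
                                                                          | true => simp_all
                                                                          | false =>
                                                                            cases h36 : PySem.Str.isIn "dynamics" al with
                                                                            | true => simp_all
                                                                            | false =>
                                                                              cases h37 : PySem.Str.isIn "oracle" al with
                                                                              | true => simp_all
                                                                              | false =>
                                                                                cases h38 : PySem.Str.isIn "netsuite" al with
                                                                                | true => simp_all
                                                                                | false =>
                                                                                  cases h39 : PySem.Str.isIn "erp" al with
                                                                                  | true => simp_all
                                                                                  | false =>
                                                                                    cases h40 : PySem.Str.isIn "onedrive" al with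
                                                                                    | true => simp_all
                                                                                    | false =>
                                                                                      cases h41 : PySem.Str.isIn "dropbox" al with
                                                                                      | true => simp_all
                                                                                      | false =>
                                                                                        cases h42 : PySem.Str.isIn "google drive" al with
                                                                                        | true => simp_all
                                                                                        | false =>
                                                                                          cases h43 : PySem.Str.isIn "box" al with
                                                                                          | true => simp_all
                                                                                          | false =>
                                                                                            cases h44 : PySem.Str.isIn "chatgpt" al with
                                                                                            | true => simp_all
                                                                                            | false =>
                                                                                              cases h45 : PySem.Str.isIn "openai" al with
                                                                                              | true => simp_all
                                                                                              | false =>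
                                                                                                cases h46 : PySem.Str.isIn "copilot" al with
                                                                                                | true => simp_all
                                                                                                | false =>
                                                                                                  cases h47 : PySem.Str.isIn "claude" al with
                                                                                                  | true => simp_all
                                                                                                  | false =>
                                                                                                    cases h48 : PySem.Str.isIn "clipboard" al with
                                                                                                    | true => simp_all
                                                                                                    | false =>
                                                                                                      cases h49 : PySem.Str.isIn "reconciliation" al with
                                                                                                      | true => simp_all
                                                                                                      | false =>
                                                                                                        cases h50 : PySem.Str.isIn "data reconciliation" al with
                                                                                                        | true => simp_all
                                                                                                        | false =>
                                                                                                          cases h51 : PySem.Str.isIn "xlmain" al with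
                                                                                                          | true => simp_all
                                                                                                          | false =>
                                                                                                            simp_all
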